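-- pv_equiv track=rewrite | github.com/fpavogt/linestats | linestats/linestats.py | count_docstrings
-- ===== SOURCE A (Python) =====
-- def count_docstrings(lines):
--     ''' Counts docstrings and remove them from the line list.
--
--     Args:
--         lines (list[str]): list of the code lines (in order!)
--
--     Returns:
--         int, list[str]: number of docstring lines, list of the code lines with all the docstrings
--                         removed
--
--     '''
--
--     lines_minus_docstr = []
--     counter = 0
--     in_docstr = False
--
--     # Go through each line in order
--     for line in lines:
--
--         #Look for the docstring tag
--         if line.strip(' ').startswith(("'''", '"""')):
--             in_docstr = ~in_docstr
--             counter += 1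
--             continue
--
--         # If I am in a docstring, count the extra lines
--         if in_docstr:
--             counter += 1
--         # Else, keep the line for latter
--         else:
--             lines_minus_docstr += [line]
--
--     # A small sanity check before closing
--     if len(lines_minus_docstr) != len(lines) - counter:
--         raise Exception('Ouch! Something is very wrong here!')
--
--     return counter, lines_minus_docstr
-- ===== SOURCE B (Python) =====
-- def count_docstrings(lines):
--     ''' Counts docstrings and remove them from the line list.
--
--     Block-skipping scan: on a docstring delimiter, scan forward to the matching
--     closing delimiter and drop the whole block at once; the count of removed
--     lines is derived at the end as len(lines) - len(kept).
--     '''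
--
--     def is_delim(line):
--         return line.strip(' ').startswith(("'''", '"""'))
--
--     kept = []
--     i, n = 0, len(lines)
--     while i < n:
--         if is_delim(lines[i]):
--             i += 1
--             # skip the docstring body up to (and including) the closing delimiter
--             while i < n and not is_delim(lines[i]):
--                 i += 1
--             i += 1
--         else:
--             kept.append(lines[i])
--             i += 1
--
--     return n - len(kept), kept
-- ===== Notes on version B (the rewrite author's own statement) =====
-- stated objective: alternative
-- what changed: Replaces the per-line toggle (`~`-flipped in_docstr flag plus an incremented counter) with a block-skipping scan that, on a delimiter, advances through the whole docstring block at once and derives the count at the end as len(lines) - len(kept).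
import Mathlib
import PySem

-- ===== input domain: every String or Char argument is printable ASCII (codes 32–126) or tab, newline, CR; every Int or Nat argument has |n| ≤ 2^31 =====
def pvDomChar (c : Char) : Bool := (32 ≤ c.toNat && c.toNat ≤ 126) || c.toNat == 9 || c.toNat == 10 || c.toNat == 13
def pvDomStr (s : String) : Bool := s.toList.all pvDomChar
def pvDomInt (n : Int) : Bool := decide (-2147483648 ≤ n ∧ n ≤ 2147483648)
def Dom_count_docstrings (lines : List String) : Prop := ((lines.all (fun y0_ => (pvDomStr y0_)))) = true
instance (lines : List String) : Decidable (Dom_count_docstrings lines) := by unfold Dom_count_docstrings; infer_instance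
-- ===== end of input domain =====

-- B replaces A's per-line `~`-toggle with a block-skipping scan deriving the count from the lengths (objective: alternative).

-- ===== PORT A =====
-- line.strip(' ').startswith(("'''", '"""'))
def isDelimA (line : String) : Bool :=
  PySem.Str.startswith (PySem.Str.stripChars line " ") "'''" ||
  PySem.Str.startswith (PySem.Str.stripChars line " ") "\"\"\""

-- A's loop: state (lines_minus_docstr, counter, in_docstr); Python's `~` on the
-- bool-then-int in_docstr is Int.not (False = 0; any nonzero int is truthy).
-- A's final sanity check `len(lines_minus_docstr) != len(lines) - counter` never
-- fires (counter + len(kept) = lines processed is a loop invariant, immediate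
-- from loopA_states below), so the `raise` is unreachable and not ported.
def count_docstrings (lines : List String) : Int × List String :=
  let st := lines.foldl
    (fun (s : List String × Int × Int) line =>
      if isDelimA line then (s.1, s.2.1 + 1, Int.not s.2.2)
      else if s.2.2 ≠ 0 then (s.1, s.2.1 + 1, s.2.2)
      else (s.1 ++ [line], s.2.1, s.2.2))
    ([], 0, 0)
  (st.2.1, st.1)

-- ===== PORT B =====
def isDelimB (line : String) : Bool :=
  PySem.Str.startswith (PySem.Str.stripChars line " ") "'''" ||
  PySem.Str.startswith (PySem.Str.stripChars line " ") "\"\"\""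

-- Source B's outer while (keptB) and inner skipping while (skipB), as structural
-- recursion on the suffix of lines still to scan.
mutual
  def keptB : List String → List String
    | [] => []
    | l :: rest => if isDelimB l then skipB rest else l :: keptB rest
  def skipB : List String → List String
    | [] => []
    | l :: rest => if isDelimB l then keptB rest else skipB rest
end

def count_docstrings_alt (lines : List String) : Int × List String :=
  let kept := keptB lines
  ((lines.length : Int) - (kept.length : Int), kept)

-- ===== PRECONDITION & SPEC =====
def Spec_count_docstrings (lines : List String) (out : Int × List String) : Prop := out = count_docstrings_alt lines
instance (lines : List String) (out : Int × List String) : Decidable (Spec_count_docstrings lines out) := by unfold Spec_count_docstrings; infer_instance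

-- ===== CLAIM (what is proved, stated in full; the proofs are below) =====
def Claim_equal_count_docstrings : Prop := ∀ (lines : List String), Dom_count_docstrings lines → Spec_count_docstrings lines (count_docstrings lines)

-- ===== LEMMAS AND PROOFS =====

-- A's fold started in state 0 (not in a docstring) keeps exactly keptB of the
-- suffix and counts its complement; started in state -1 it keeps skipB likewise
-- (the final flag is left unconstrained: an unclosed docstring ends in -1).
theorem loopA_states (rest : List String) :
    (∀ (kept : List String) (counter : Int),
      (rest.foldl
        (fun (s : List String × Int × Int) line =>
          if isDelimA line then (s.1, s.2.1 + 1, Int.not s.2.2)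
          else if s.2.2 ≠ 0 then (s.1, s.2.1 + 1, s.2.2)
          else (s.1 ++ [line], s.2.1, s.2.2)) (kept, counter, 0)).1
        = kept ++ keptB rest ∧
      (rest.foldl
        (fun (s : List String × Int × Int) line =>
          if isDelimA line then (s.1, s.2.1 + 1, Int.not s.2.2)
          else if s.2.2 ≠ 0 then (s.1, s.2.1 + 1, s.2.2)
          else (s.1 ++ [line], s.2.1, s.2.2)) (kept, counter, 0)).2.1
        = counter + ((rest.length : Int) - ((keptB rest).length : Int))) ∧
    (∀ (kept : List String) (counter : Int),
      (rest.foldl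
        (fun (s : List String × Int × Int) line =>
          if isDelimA line then (s.1, s.2.1 + 1, Int.not s.2.2)
          else if s.2.2 ≠ 0 then (s.1, s.2.1 + 1, s.2.2)
          else (s.1 ++ [line], s.2.1, s.2.2)) (kept, counter, -1)).1
        = kept ++ skipB rest ∧
      (rest.foldl
        (fun (s : List String × Int × Int) line =>
          if isDelimA line then (s.1, s.2.1 + 1, Int.not s.2.2)
          else if s.2.2 ≠ 0 then (s.1, s.2.1 + 1, s.2.2)
          else (s.1 ++ [line], s.2.1, s.2.2)) (kept, counter, -1)).2.1
        = counter + ((rest.length : Int) - ((skipB rest).length : Int))) := by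
  induction rest with
  | nil => simp [keptB, skipB]
  | cons l rest ih =>
    obtain ⟨ih0, ih1⟩ := ih
    constructor
    · intro kept counter
      by_cases h : isDelimA l
      · have hB : isDelimB l := h
        simp only [List.foldl_cons, h, if_true]
        have hnot : Int.not 0 = -1 := by decide
        rw [hnot]
        obtain ⟨h1, h2⟩ := ih1 kept (counter + 1)
        refine ⟨?_, ?_⟩
        · rw [h1]; simp [keptB, hB]
        · rw [h2]
          simp only [keptB, hB, if_true, List.length_cons]
          push_cast
          omega
      · have hB : ¬ isDelimB l := h
        simp only [List.foldl_cons, h, Bool.false_eq_true, if_false, ne_eq,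
          not_true_eq_false]
        obtain ⟨h1, h2⟩ := ih0 (kept ++ [l]) counter
        refine ⟨?_, ?_⟩
        · rw [h1]; simp [keptB, hB]
        · rw [h2]
          simp only [keptB, hB, Bool.false_eq_true, if_false, List.length_cons]
          push_cast
          omega
    · intro kept counter
      by_cases h : isDelimA l
      · have hB : isDelimB l := h
        simp only [List.foldl_cons, h, if_true]
        have hnot : Int.not (-1) = 0 := by decide
        rw [hnot]
        obtain ⟨h1, h2⟩ := ih0 kept (counter + 1)
        refine ⟨?_, ?_⟩
        · rw [h1]; simp [skipB, hB]
        · rw [h2]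
          simp only [skipB, hB, if_true, List.length_cons]
          push_cast
          omega
      · have hB : ¬ isDelimB l := h
        simp only [List.foldl_cons, h, Bool.false_eq_true, if_false, ne_eq,
          neg_eq_zero, one_ne_zero, not_false_eq_true, if_true]
        obtain ⟨h1, h2⟩ := ih1 kept (counter + 1)
        refine ⟨?_, ?_⟩
        · rw [h1]; simp [skipB, hB]
        · rw [h2]
          simp only [skipB, hB, Bool.false_eq_true, if_false, List.length_cons]
          push_cast
          omega

theorem count_docstrings_eq (lines : List String) :
    count_docstrings lines = count_docstrings_alt lines := by
  obtain ⟨h1, h2⟩ := (loopA_states lines).1 [] 0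
  simp only [count_docstrings, count_docstrings_alt, h1, h2, List.nil_append, zero_add]

-- ===== VERDICT (by name: the statement is the Claim_ definition above) =====
theorem count_docstrings_spec : Claim_equal_count_docstrings := by
  intro lines _
  exact count_docstrings_eq lines
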